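-- pv_equiv track=rewrite | github.com/Kristong-Trax/developmentTest | Projects/KCUS/Utils/KCUS_GENERAL_TOOLBOX.py | _filter_sequences
-- ===== SOURCE A (Python) =====
-- def _filter_sequences(sequences):
--     """
--     This function receives a list of sequences (lists of indexes), and removes sequences which can be represented
--     by a shorter sequence (which is also in the list).
--     """
--     if not sequences:
--         return sequences
--     sequences = sorted(sequences, key=lambda x: (x[-1], len(x)))
--     filtered_sequences = [sequences[0]]
--     for sequence in sequences[1:]:
--         if sequence[-1] != filtered_sequences[-1][-1]:
--             filtered_sequences.append(sequence)
--     return filtered_sequences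
-- ===== SOURCE B (Python) =====
-- def _filter_sequences(sequences):
--     """
--     Keep, for each distinct last index, the shortest sequence (earliest on
--     equal length), emitted in ascending order of that last index.
--     """
--     if not sequences:
--         return sequences
--     grouped = {}
--     for seq in sequences:
--         key = seq[-1]
--         cur = grouped.get(key)
--         if cur is None or len(seq) < len(cur):
--             grouped[key] = seq
--     return [grouped[key] for key in sorted(grouped)]
-- ===== Notes on version B (the rewrite author's own statement) =====
-- stated objective: alternative
-- what changed: Replaces the global stable sort by (last,len) followed by a run-dedup scan with a single dict-building pass keyed on each sequence's last element that keeps the shortest (earliest on ties) sequence, then emits the stored sequences over the sorted distinct keys.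
import Mathlib
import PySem

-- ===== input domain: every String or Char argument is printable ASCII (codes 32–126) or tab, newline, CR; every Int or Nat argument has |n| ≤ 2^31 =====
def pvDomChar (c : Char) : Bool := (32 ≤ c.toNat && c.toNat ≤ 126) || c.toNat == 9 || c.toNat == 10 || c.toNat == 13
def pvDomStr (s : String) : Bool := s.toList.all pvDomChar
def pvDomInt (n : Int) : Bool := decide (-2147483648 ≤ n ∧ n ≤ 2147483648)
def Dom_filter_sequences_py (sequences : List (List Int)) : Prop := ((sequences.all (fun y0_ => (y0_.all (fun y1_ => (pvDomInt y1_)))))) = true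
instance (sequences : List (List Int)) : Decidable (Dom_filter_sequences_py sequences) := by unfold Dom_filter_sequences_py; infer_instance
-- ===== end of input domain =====

-- B replaces A's global stable sort by (last, len) + run-dedup scan with one dict pass
-- keyed on each sequence's last element (keeping the shortest, earliest on ties) read
-- out over the sorted keys; objective: alternative (different algorithm, similar cost).

-- seq[-1] on a list of ints (Pre_ guarantees every list is nonempty, so the default is never used)
def pvLast (x : List Int) : Int := (PySem.List.pyGet? x (-1)).getD 0

-- ===== PORT A =====
def filter_sequences_py (sequences : List (List Int)) : List (List Int) :=
  if sequences = [] then sequences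
  else
    match PySem.List.sorted2 sequences (fun x => pvLast x) (fun x => (x.length : Int)) with
    | [] => []
    | h :: t =>
        t.foldl (fun acc seq =>
          if pvLast seq ≠ pvLast (PySem.List.pyGetD acc (-1) []) then acc ++ [seq] else acc) [h]

-- ===== PORT B =====
-- one step of B's dict pass: keep the stored sequence unless the new one is strictly shorter
def altStep (d : PySem.Dict Int (List Int)) (seq : List Int) : PySem.Dict Int (List Int) :=
  match PySem.Dict.get? d (pvLast seq) with
  | none => PySem.Dict.insert d (pvLast seq) seq
  | some cur => if seq.length < cur.length then PySem.Dict.insert d (pvLast seq) seq else d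

def filter_sequences_py_alt (sequences : List (List Int)) : List (List Int) :=
  if sequences = [] then sequences
  else
    let d := sequences.foldl altStep PySem.Dict.empty
    (PySem.List.sorted (PySem.Dict.keys d) (fun kk => kk) false).map
      (fun kk => PySem.Dict.getD d kk [])

-- ===== PRECONDITION & SPEC =====
-- Pre_ excludes inputs containing an empty inner list: Python's seq[-1] raises IndexError there.
def Pre_filter_sequences_py (sequences : List (List Int)) : Prop :=
  ∀ s ∈ sequences, s ≠ []
instance (sequences : List (List Int)) : Decidable (Pre_filter_sequences_py sequences) := by
  unfold Pre_filter_sequences_py; infer_instance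

def pvWitness_filter_sequences_py : List (List Int) := [[1, 2], [3], [0, 3]]

def Spec_filter_sequences_py (sequences : List (List Int)) (out : List (List Int)) : Prop := out = filter_sequences_py_alt sequences
instance (sequences : List (List Int)) (out : List (List Int)) : Decidable (Spec_filter_sequences_py sequences out) := by unfold Spec_filter_sequences_py; infer_instance

-- ===== CLAIM (what is proved, stated in full; the proofs are below) =====
def Claim_equal_filter_sequences_py : Prop := ∀ (sequences : List (List Int)), Dom_filter_sequences_py sequences → Pre_filter_sequences_py sequences → Spec_filter_sequences_py sequences (filter_sequences_py sequences)

-- ===== LEMMAS AND PROOFS =====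

-- the strict "before" predicate sorted2 uses (lexicographic on (pvLast, length))
def b2 (a b : List Int) : Bool :=
  decide (pvLast a < pvLast b) ||
    (!decide (pvLast b < pvLast a) && decide ((a.length : Int) < (b.length : Int)))

-- the non-strict lexicographic order that a sorted2-output is Pairwise in
def lexle (a b : List Int) : Prop :=
  pvLast a < pvLast b ∨ (pvLast a = pvLast b ∧ a.length ≤ b.length)

-- one step of "first sequence of minimal length among those with last element kk"
def bstep (kk : Int) (acc : Option (List Int)) (x : List Int) : Option (List Int) :=
  if pvLast x = kk then
    match acc with
    | none => some x
    | some y => if x.length < y.length then some x else some y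
  else acc

def bestF (kk : Int) (acc : Option (List Int)) (l : List (List Int)) : Option (List Int) :=
  l.foldl (bstep kk) acc

def best (kk : Int) (l : List (List Int)) : Option (List Int) := bestF kk none l

-- A's dedup loop in recursive form: keep the head of each run of equal keys
def gg (h : List Int) : List (List Int) → List (List Int)
  | [] => [h]
  | y :: t => if pvLast y = pvLast h then gg h t else h :: gg y t

-- the common normal form both programs compute
def canonF (l : List (List Int)) : List (List Int) :=
  (PySem.List.sorted (PySem.Set.ofList (l.map pvLast)) (fun kk => kk) false).map
    (fun kk => (best kk l).getD [])

def SA (xs : List (List Int)) : List (List Int) :=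
  PySem.List.sorted2 xs (fun x => pvLast x) (fun x => (x.length : Int)) false

def DD (xs : List (List Int)) : PySem.Dict Int (List Int) :=
  xs.foldl altStep PySem.Dict.empty

theorem lexle_trans {a b c : List Int} (h1 : lexle a b) (h2 : lexle b c) : lexle a c := by
  unfold lexle at *; omega

theorem b2_true_lexle {a b : List Int} (h : b2 a b = true) : lexle a b := by
  unfold b2 at h; unfold lexle
  simp only [Bool.or_eq_true, Bool.and_eq_true, Bool.not_eq_eq_eq_not, Bool.not_true,
    decide_eq_true_eq, decide_eq_false_iff_not] at h
  omega

theorem b2_false_lexle {a b : List Int} (h : b2 a b = false) : lexle b a := by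
  unfold b2 at h; unfold lexle
  simp only [Bool.or_eq_false_iff, Bool.and_eq_false_iff, Bool.not_eq_eq_eq_not, Bool.not_false,
    decide_eq_false_iff_not, decide_eq_true_eq] at h
  omega

theorem insertBy_pairwise {x : List Int} {l : List (List Int)}
    (hp : l.Pairwise lexle) : (PySem.List.insertBy b2 x l).Pairwise lexle := by
  induction l with
  | nil => simp [PySem.List.insertBy]
  | cons y t ih =>
    rcases List.pairwise_cons.mp hp with ⟨hy, ht⟩
    by_cases hb : b2 x y = true
    · rw [PySem.List.insertBy, if_pos hb]
      refine List.pairwise_cons.mpr ⟨?_, hp⟩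
      intro z hz
      rcases List.mem_cons.mp hz with rfl | hz
      · exact b2_true_lexle hb
      · exact lexle_trans (b2_true_lexle hb) (hy z hz)
    · rw [PySem.List.insertBy, if_neg hb]
      refine List.pairwise_cons.mpr ⟨?_, ih ht⟩
      intro z hz
      rcases (PySem.List.mem_insertBy b2 x z t).mp hz with rfl | hz
      · exact b2_false_lexle (by simp [hb])
      · exact hy z hz

theorem bestF_nomatch {kk : Int} {l : List (List Int)} (acc : Option (List Int))
    (h : ∀ z ∈ l, pvLast z ≠ kk) : bestF kk acc l = acc := by
  induction l generalizing acc with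
  | nil => rfl
  | cons z t ih =>
    have hz : pvLast z ≠ kk := h z (List.mem_cons_self ..)
    show bestF kk (bstep kk acc z) t = acc
    rw [show bstep kk acc z = acc by unfold bstep; rw [if_neg hz]]
    exact ih acc (fun w hw => h w (List.mem_cons_of_mem _ hw))

theorem bstep_skip {kk : Int} {z : List Int} (hz : pvLast z ≠ kk) (acc : Option (List Int)) :
    bstep kk acc z = acc := by
  unfold bstep; rw [if_neg hz]

theorem bstep_none {kk : Int} {x : List Int} (hx : pvLast x = kk) :
    bstep kk none x = some x := by
  unfold bstep; rw [if_pos hx]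

theorem bstep_some {kk : Int} {x : List Int} (hx : pvLast x = kk) (a : List Int) :
    bstep kk (some a) x = if x.length < a.length then some x else some a := by
  unfold bstep; rw [if_pos hx]

theorem bstep_comm {kk : Int} (acc : Option (List Int)) {x z : List Int}
    (h : pvLast x = kk → pvLast z = kk → x.length < z.length) :
    bstep kk (bstep kk acc x) z = bstep kk (bstep kk acc z) x := by
  by_cases hx : pvLast x = kk
  · by_cases hz : pvLast z = kk
    · have hlt := h hx hz
      cases acc with
      | none =>
        rw [bstep_none hx, bstep_none hz, bstep_some hz, bstep_some hx,
          if_neg (by omega), if_pos hlt]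
      | some a =>
        rw [bstep_some hx, bstep_some hz]
        split_ifs <;> rw [bstep_some hz, bstep_some hx] <;>
          split_ifs <;> first | rfl | (exfalso; omega)
    · simp only [bstep_skip hz]
  · simp only [bstep_skip hx]

theorem bestF_comm {kk : Int} {x : List Int} {l : List (List Int)} (acc : Option (List Int))
    (h : pvLast x = kk → ∀ z ∈ l, pvLast z = kk → x.length < z.length) :
    bestF kk (bstep kk acc x) l = bstep kk (bestF kk acc l) x := by
  induction l generalizing acc with
  | nil => rfl
  | cons z t ih =>
    show bestF kk (bstep kk (bstep kk acc x) z) t = bstep kk (bestF kk (bstep kk acc z) t) x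
    rw [bstep_comm acc (fun hx hz => h hx z (List.mem_cons_self ..) hz)]
    exact ih (bstep kk acc z) (fun hx w hw => h hx w (List.mem_cons_of_mem _ hw))

theorem bestF_insertBy {kk : Int} {x : List Int} {l : List (List Int)}
    (hp : l.Pairwise lexle) (acc : Option (List Int)) :
    bestF kk acc (PySem.List.insertBy b2 x l) = bstep kk (bestF kk acc l) x := by
  induction l generalizing acc with
  | nil => rfl
  | cons y t ih =>
    rcases List.pairwise_cons.mp hp with ⟨hy, ht⟩
    by_cases hb : b2 x y = true
    · rw [PySem.List.insertBy, if_pos hb]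
      show bestF kk (bstep kk acc x) (y :: t) = bstep kk (bestF kk acc (y :: t)) x
      refine bestF_comm acc ?_
      intro hx z hz hzkk
      have hlex : lexle y z ∨ z = y := by
        rcases List.mem_cons.mp hz with rfl | hz
        · exact Or.inr rfl
        · exact Or.inl (hy z hz)
      have hb' := hb
      unfold b2 at hb'
      simp only [Bool.or_eq_true, Bool.and_eq_true, Bool.not_eq_eq_eq_not, Bool.not_true,
        decide_eq_true_eq, decide_eq_false_iff_not] at hb'
      rcases hlex with hlex | rfl
      · unfold lexle at hlex; omega
      · omega
    · rw [PySem.List.insertBy, if_neg hb]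
      show bestF kk (bstep kk acc y) (PySem.List.insertBy b2 x t) = bstep kk (bestF kk (bstep kk acc y) t) x
      exact ih ht (bstep kk acc y)

theorem SA_snoc (xs : List (List Int)) (x : List Int) :
    SA (xs ++ [x]) = PySem.List.insertBy b2 x (SA xs) := by
  unfold SA PySem.List.sorted2
  simp only [if_neg (by decide : ¬ (false = true)), List.foldl_append, List.foldl_cons, List.foldl_nil]
  rfl

theorem best_snoc (kk : Int) (xs : List (List Int)) (x : List Int) :
    best kk (xs ++ [x]) = bstep kk (best kk xs) x := by
  unfold best bestF
  rw [List.foldl_append]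
  rfl

theorem SA_good (xs : List (List Int)) :
    (SA xs).Pairwise lexle ∧ ∀ kk, best kk (SA xs) = best kk xs := by
  induction xs using List.reverseRecOn with
  | nil => exact ⟨List.Pairwise.nil, fun _ => rfl⟩
  | append_singleton xs x ih =>
    rcases ih with ⟨hp, hb⟩
    constructor
    · rw [SA_snoc]; exact insertBy_pairwise hp
    · intro kk
      rw [SA_snoc, best_snoc]
      show bestF kk none (PySem.List.insertBy b2 x (SA xs)) = bstep kk (best kk xs) x
      rw [bestF_insertBy hp none]
      rw [show bestF kk none (SA xs) = best kk (SA xs) from rfl, hb kk]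

-- Set.ofList helpers -------------------------------------------------------

theorem foldl_add_cons {a : Int} {l : List Int} (s : List Int) (ha : a ∉ l) :
    List.foldl PySem.Set.add (a :: s) l = a :: List.foldl PySem.Set.add s l := by
  induction l generalizing s with
  | nil => rfl
  | cons x t ih =>
    have hxa : x ≠ a := fun h => ha (h ▸ List.mem_cons_self ..)
    have hstep : PySem.Set.add (a :: s) x = a :: PySem.Set.add s x := by
      unfold PySem.Set.add PySem.Set.contains
      simp only [List.contains_cons]
      rw [show (x == a) = false from beq_eq_false_iff_ne.mpr hxa]
      simp only [Bool.false_or]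
      split_ifs <;> rfl
    rw [List.foldl_cons, hstep, List.foldl_cons]
    exact ih _ (fun h => ha (List.mem_cons_of_mem _ h))

theorem ofList_cons_not_mem {a : Int} {l : List Int} (ha : a ∉ l) :
    PySem.Set.ofList (a :: l) = a :: PySem.Set.ofList l := by
  unfold PySem.Set.ofList
  rw [List.foldl_cons]
  rw [show PySem.Set.add PySem.Set.empty a = [a] from rfl]
  exact foldl_add_cons [] ha

theorem ofList_cons_cons_self (a : Int) (l : List Int) :
    PySem.Set.ofList (a :: a :: l) = PySem.Set.ofList (a :: l) := by
  unfold PySem.Set.ofList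
  simp [PySem.Set.add, PySem.Set.contains, PySem.Set.empty]

theorem sorted_ofList_cons_lt {a : Int} {l : List Int} (h : ∀ b ∈ l, a < b) :
    PySem.List.sorted (PySem.Set.ofList (a :: l)) (fun kk => kk) false
      = a :: PySem.List.sorted (PySem.Set.ofList l) (fun kk => kk) false := by
  have ha : a ∉ l := fun hm => lt_irrefl a (h a hm)
  refine PySem.List.sorted_eq_of_perm_of_pairwise_lt _ _ _ ?_ ?_
  · rw [ofList_cons_not_mem ha]
    exact List.Perm.cons a (PySem.List.sorted_perm _ _ _)
  · refine List.pairwise_cons.mpr ⟨?_, PySem.List.sorted_ofList_pairwise_lt l⟩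
    intro b hb
    exact h b ((PySem.Set.mem_ofList l b).mp ((PySem.List.mem_sorted _ _ _ b).mp hb))

-- the central characterisation: A's run-dedup of a lexle-sorted list is canonF --------

theorem gg_canonF : ∀ (t : List (List Int)) (h : List Int),
    (h :: t).Pairwise lexle → gg h t = canonF (h :: t) := by
  intro t
  induction t with
  | nil =>
    intro h _
    unfold gg canonF best bestF
    simp [PySem.Set.ofList, PySem.Set.add, PySem.Set.contains, PySem.Set.empty,
      PySem.List.sorted, PySem.List.insertBy, bstep]
  | cons y t' ih =>
    intro h hp
    rcases List.pairwise_cons.mp hp with ⟨hh, hp'⟩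
    rcases List.pairwise_cons.mp hp' with ⟨hy, hpt⟩
    have hhy : lexle h y := hh y (List.mem_cons_self ..)
    by_cases hk : pvLast y = pvLast h
    · -- skip y: same key as the current run head
      rw [show gg h (y :: t') = gg h t' by rw [gg, if_pos hk]]
      have hp2 : (h :: t').Pairwise lexle :=
        List.pairwise_cons.mpr ⟨fun z hz => hh z (List.mem_cons_of_mem _ hz), hpt⟩
      rw [ih h hp2]
      -- canonF (h :: t') = canonF (h :: y :: t')
      unfold canonF
      have hkeys : PySem.Set.ofList ((h :: y :: t').map pvLast)
          = PySem.Set.ofList ((h :: t').map pvLast) := by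
        simp only [List.map_cons, hk]
        exact ofList_cons_cons_self _ _
      have hbest : ∀ kk, best kk (h :: y :: t') = best kk (h :: t') := by
        intro kk
        show bestF kk (bstep kk (bstep kk none h) y) t' = bestF kk (bstep kk none h) t'
        congr 1
        unfold bstep
        by_cases hkk : pvLast h = kk
        · rw [if_pos hkk, if_pos (hk.trans hkk)]
          have : h.length ≤ y.length := by unfold lexle at hhy; omega
          simp only []
          rw [if_neg (by omega)]
        · rw [if_neg hkk, if_neg (fun hc => hkk (hk ▸ hc))]
      rw [hkeys]
      refine List.map_congr_left ?_
      intro kk _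
      show (best kk (h :: t')).getD [] = (best kk (h :: y :: t')).getD []
      rw [hbest kk]
    · -- new key: h is emitted, recurse from y
      rw [show gg h (y :: t') = h :: gg y t' by rw [gg, if_neg hk]]
      rw [ih y hp']
      have hlt : ∀ b ∈ (y :: t').map pvLast, pvLast h < b := by
        intro b hb
        rcases List.mem_map.mp hb with ⟨z, hz, rfl⟩
        rcases List.mem_cons.mp hz with rfl | hz
        · unfold lexle at hhy; omega
        · have h1 : lexle h z := hh z (List.mem_cons_of_mem _ hz)
          have h2 : lexle y z := hy z hz
          unfold lexle at hhy h1 h2; omega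
      unfold canonF
      rw [show (h :: y :: t').map pvLast = pvLast h :: (y :: t').map pvLast from rfl,
        sorted_ofList_cons_lt hlt]
      have hhead : best (pvLast h) (h :: y :: t') = some h := by
        show bestF (pvLast h) (bstep (pvLast h) none h) (y :: t') = some h
        rw [bstep_none rfl]
        refine bestF_nomatch _ ?_
        intro z hz hc
        exact absurd (hc ▸ hlt (pvLast z) (List.mem_map_of_mem hz)) (lt_irrefl _)
      rw [List.map_cons]
      congr 1
      · -- head entry: best (pvLast h) (h :: y :: t') = some h
        show h = (best (pvLast h) (h :: y :: t')).getD []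
        rw [hhead]
        rfl
      · -- tail entries: keys there differ from pvLast h, so h never matches
        refine List.map_congr_left ?_
        intro kk hkk
        have hkmem : kk ∈ (y :: t').map pvLast :=
          (PySem.Set.mem_ofList _ kk).mp ((PySem.List.mem_sorted _ _ _ kk).mp hkk)
        have hne : pvLast h ≠ kk := fun hc => absurd (hc ▸ hlt kk hkmem) (lt_irrefl _)
        show (best kk (y :: t')).getD [] = (best kk (h :: y :: t')).getD []
        have : best kk (h :: y :: t') = best kk (y :: t') := by
          show bestF kk (bstep kk none h) (y :: t') = bestF kk none (y :: t')
          rw [bstep_skip hne]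
        rw [this]

-- A's foldl dedup loop equals gg ------------------------------------------

theorem pyGetD_append_last (acc : List (List Int)) (h : List Int) :
    PySem.List.pyGetD (acc ++ [h]) (-1) [] = h := by
  unfold PySem.List.pyGetD
  have : PySem.List.pyGet? (acc ++ [h]) (-1) = some h := by
    simp [PySem.List.pyGet?, PySem.List.pyIdx?]
  rw [this]; rfl

theorem foldl_dedup_gg : ∀ (t acc : List (List Int)) (h : List Int),
    t.foldl (fun acc seq =>
      if pvLast seq ≠ pvLast (PySem.List.pyGetD acc (-1) []) then acc ++ [seq] else acc)
      (acc ++ [h]) = acc ++ gg h t := by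
  intro t
  induction t with
  | nil => intro acc h; rfl
  | cons y t' ih =>
    intro acc h
    rw [List.foldl_cons, pyGetD_append_last]
    by_cases hk : pvLast y = pvLast h
    · rw [if_neg (by simpa using hk), gg, if_pos hk]
      exact ih acc h
    · rw [if_pos (by simpa using hk), gg, if_neg hk]
      rw [List.append_assoc]
      have := ih (acc ++ [h]) y
      simpa [List.append_assoc] using this
-- B's dict pass ------------------------------------------------------------

theorem keys_insert_of_contains (d : PySem.Dict Int (List Int)) (k : Int) (v : List Int)
    (h : d.contains k = true) : (d.insert k v).keys = d.keys := by
  unfold PySem.Dict.insert PySem.Dict.keys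
  rw [if_pos h]
  simp only [List.map_map]
  refine List.map_congr_left ?_
  intro p _
  by_cases hp : p.1 = k
  · simp [Function.comp, hp]
  · simp [Function.comp, beq_eq_false_iff_ne.mpr hp]

theorem keys_insert_of_not_contains (d : PySem.Dict Int (List Int)) (k : Int) (v : List Int)
    (h : d.contains k = false) : (d.insert k v).keys = d.keys ++ [k] := by
  unfold PySem.Dict.insert PySem.Dict.keys
  rw [if_neg (by simp [h])]
  simp

theorem ofList_snoc (l : List Int) (a : Int) :
    PySem.Set.ofList (l ++ [a]) = PySem.Set.add (PySem.Set.ofList l) a := by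
  unfold PySem.Set.ofList
  rw [List.foldl_append]
  rfl

theorem mem_keys_iff_isSome (d : PySem.Dict Int (List Int)) (k : Int) :
    k ∈ d.keys ↔ (d.get? k).isSome := by
  constructor
  · intro h
    cases hg : d.get? k with
    | none => exact absurd ((PySem.Dict.get?_eq_none_iff_not_mem_keys d k).mp hg) (fun hn => hn h)
    | some v => rfl
  · intro h
    by_contra hn
    rw [(PySem.Dict.get?_eq_none_iff_not_mem_keys d k).mpr hn] at h
    exact absurd h (by simp)

theorem DD_snoc (xs : List (List Int)) (x : List Int) :
    DD (xs ++ [x]) = altStep (DD xs) x := by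
  unfold DD
  rw [List.foldl_append]
  rfl

theorem contains_ofList (l : List Int) (a : Int) :
    PySem.Set.contains (PySem.Set.ofList l) a = true ↔ a ∈ l := by
  unfold PySem.Set.contains
  simp only [List.contains_eq_mem, decide_eq_true_eq]
  exact PySem.Set.mem_ofList l a

theorem DD_good (xs : List (List Int)) :
    (DD xs).keys = PySem.Set.ofList (xs.map pvLast) ∧
      ∀ kk, PySem.Dict.get? (DD xs) kk = best kk xs := by
  induction xs using List.reverseRecOn with
  | nil => exact ⟨rfl, fun _ => PySem.Dict.get?_empty _⟩
  | append_singleton xs x ih =>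
    rcases ih with ⟨hk, hg⟩
    have hmem : (DD xs).contains (pvLast x) = ((DD xs).get? (pvLast x)).isSome :=
      PySem.Dict.contains_eq_isSome_get? _ _
    rw [DD_snoc]
    unfold altStep
    cases hgx : PySem.Dict.get? (DD xs) (pvLast x) with
    | none =>
      have hc : (DD xs).contains (pvLast x) = false := by rw [hmem, hgx]; rfl
      have hnotin : pvLast x ∉ xs.map pvLast := by
        intro hm
        have : pvLast x ∈ (DD xs).keys := by
          rw [hk]; exact (PySem.Set.mem_ofList _ _).mpr hm
        rw [mem_keys_iff_isSome, hgx] at this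
        exact absurd this (by simp)
      constructor
      · rw [keys_insert_of_not_contains _ _ _ hc, hk]
        simp only [List.map_append, List.map_cons, List.map_nil]
        rw [ofList_snoc]
        unfold PySem.Set.add
        rw [if_neg (fun hcc => hnotin ((contains_ofList _ _).mp hcc))]
      · intro kk
        rw [best_snoc]
        by_cases hkk : kk = pvLast x
        · subst hkk
          have hb0 : best (pvLast x) xs = none := by rw [← hg]; exact hgx
          rw [PySem.Dict.get?_insert_self, hb0, bstep_none rfl]
        · rw [PySem.Dict.get?_insert_of_ne _ _ hkk, hg kk, bstep_skip (fun hc => hkk hc.symm)]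
    | some cur =>
      have hbx : best (pvLast x) xs = some cur := by rw [← hg]; exact hgx
      have hc : (DD xs).contains (pvLast x) = true := by rw [hmem, hgx]; rfl
      have hin : pvLast x ∈ xs.map pvLast := by
        have hkm : pvLast x ∈ (DD xs).keys :=
          (mem_keys_iff_isSome _ _).mpr (by rw [hgx]; rfl)
        rw [hk] at hkm
        exact (PySem.Set.mem_ofList _ _).mp hkm
      have hkeys2 : PySem.Set.ofList ((xs ++ [x]).map pvLast)
          = PySem.Set.ofList (xs.map pvLast) := by
        simp only [List.map_append, List.map_cons, List.map_nil]
        rw [ofList_snoc]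
        unfold PySem.Set.add
        rw [if_pos ((contains_ofList _ _).mpr hin)]
      have hred : (match some cur with
          | none => (DD xs).insert (pvLast x) x
          | some cur => if x.length < cur.length then (DD xs).insert (pvLast x) x else DD xs)
          = if x.length < cur.length then (DD xs).insert (pvLast x) x else DD xs := rfl
      rw [hred]
      by_cases hlen : x.length < cur.length
      · rw [if_pos hlen]
        constructor
        · rw [keys_insert_of_contains _ _ _ hc, hk, hkeys2]
        · intro kk
          rw [best_snoc]
          by_cases hkk : kk = pvLast x
          · subst hkk
            rw [PySem.Dict.get?_insert_self, hbx, bstep_some rfl, if_pos hlen]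
          · rw [PySem.Dict.get?_insert_of_ne _ _ hkk, hg kk, bstep_skip (fun hc => hkk hc.symm)]
      · rw [if_neg hlen]
        constructor
        · rw [hk, hkeys2]
        · intro kk
          rw [best_snoc]
          by_cases hkk : kk = pvLast x
          · subst hkk
            rw [hg (pvLast x), hbx, bstep_some rfl, if_neg hlen]
          · rw [hg kk, bstep_skip (fun hc => hkk hc.symm)]

-- keys of the sorted list are a permutation of the original keys -----------

theorem ofList_perm_of_perm {l1 l2 : List Int} (h : l1.Perm l2) :
    (PySem.Set.ofList l1).Perm (PySem.Set.ofList l2) := by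
  refine (List.perm_ext_iff_of_nodup (PySem.Set.nodup_ofList l1) (PySem.Set.nodup_ofList l2)).mpr ?_
  intro a
  rw [PySem.Set.mem_ofList, PySem.Set.mem_ofList]
  exact ⟨fun hm => h.mem_iff.mp hm, fun hm => h.mem_iff.mpr hm⟩

theorem sorted_keys_SA (xs : List (List Int)) :
    PySem.List.sorted (PySem.Set.ofList ((SA xs).map pvLast)) (fun kk => kk) false
      = PySem.List.sorted (PySem.Set.ofList (xs.map pvLast)) (fun kk => kk) false := by
  refine PySem.List.sorted_eq_sorted_of_perm _ _ _ (fun a b h => h) ?_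
  exact ofList_perm_of_perm ((PySem.List.sorted2_perm xs _ _ false).map pvLast)

-- final assembly -----------------------------------------------------------

theorem main_eq (xs : List (List Int)) :
    filter_sequences_py xs = filter_sequences_py_alt xs := by
  by_cases hnil : xs = []
  · subst hnil; rfl
  · unfold filter_sequences_py filter_sequences_py_alt
    rw [if_neg hnil, if_neg hnil]
    rcases DD_good xs with ⟨hdk, hdg⟩
    have hB : ((PySem.List.sorted (PySem.Dict.keys (DD xs)) (fun kk => kk) false).map
        (fun kk => PySem.Dict.getD (DD xs) kk []))
        = (PySem.List.sorted (PySem.Set.ofList (xs.map pvLast)) (fun kk => kk) false).map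
          (fun kk => (best kk xs).getD []) := by
      rw [hdk]
      refine List.map_congr_left ?_
      intro kk _
      unfold PySem.Dict.getD
      rw [hdg kk]
    rcases SA_good xs with ⟨hpair, hbest⟩
    have hSA : SA xs ≠ [] := by
      intro hc
      have := (PySem.List.sorted2_perm xs (fun x => pvLast x) (fun x => (x.length : Int)) false)
      rw [show PySem.List.sorted2 xs (fun x => pvLast x) (fun x => (x.length : Int)) false = SA xs from rfl, hc] at this
      exact hnil this.symm.eq_nil
    cases hS : SA xs with
    | nil => exact absurd hS hSA
    | cons h t =>
      rw [show PySem.List.sorted2 xs (fun x => pvLast x) (fun x => (x.length : Int)) false = SA xs from rfl, hS]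
      have hfold := foldl_dedup_gg t [] h
      simp only [List.nil_append] at hfold
      show (t.foldl (fun acc seq =>
          if pvLast seq ≠ pvLast (PySem.List.pyGetD acc (-1) []) then acc ++ [seq] else acc) [h])
        = List.map (fun kk => PySem.Dict.getD (DD xs) kk [])
            (PySem.List.sorted (PySem.Dict.keys (DD xs)) (fun kk => kk) false)
      rw [hfold]
      rw [gg_canonF t h (hS ▸ hpair)]
      rw [← hS]
      unfold canonF
      rw [sorted_keys_SA]
      rw [hB]
      refine List.map_congr_left ?_
      intro kk _
      rw [hbest kk]

-- ===== VERDICT (by name: the statement is the Claim_ definition above) =====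
theorem filter_sequences_py_spec : Claim_equal_filter_sequences_py := by
  intro sequences _ _
  unfold Spec_filter_sequences_py
  exact main_eq sequences
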